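-- pv_equiv track=rewrite | github.com/jiwidi/AOC-2019 | day1/main.py | calculate_fuel
-- ===== SOURCE A (Python) =====
-- def calculate_fuel(mass,recursive=False):
--     result = int(mass/3)-2
--     if (recursive):
--         fuel = result
--         while((int(fuel/3)-2)>0):
--             fuel= int(fuel/3)-2
--             result+= fuel
--     return result
-- ===== SOURCE B (Python) =====
-- def _chain(fuel):
--     """List of successive extra-fuel terms of the decreasing fuel chain (positive terms only)."""
--     nxt = int(fuel / 3) - 2
--     if nxt <= 0:
--         return []
--     return [nxt] + _chain(nxt)
--
--
-- def calculate_fuel(mass, recursive=False):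
--     base = int(mass / 3) - 2
--     if recursive:
--         return base + sum(_chain(base))
--     return base
-- ===== Notes on version B (the rewrite author's own statement) =====
-- stated objective: alternative
-- what changed: Two staged passes instead of A's single while-loop accumulator: first recursively build the list of successive extra-fuel terms of the decreasing chain, then sum that list and add it to the base.
import Mathlib
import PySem

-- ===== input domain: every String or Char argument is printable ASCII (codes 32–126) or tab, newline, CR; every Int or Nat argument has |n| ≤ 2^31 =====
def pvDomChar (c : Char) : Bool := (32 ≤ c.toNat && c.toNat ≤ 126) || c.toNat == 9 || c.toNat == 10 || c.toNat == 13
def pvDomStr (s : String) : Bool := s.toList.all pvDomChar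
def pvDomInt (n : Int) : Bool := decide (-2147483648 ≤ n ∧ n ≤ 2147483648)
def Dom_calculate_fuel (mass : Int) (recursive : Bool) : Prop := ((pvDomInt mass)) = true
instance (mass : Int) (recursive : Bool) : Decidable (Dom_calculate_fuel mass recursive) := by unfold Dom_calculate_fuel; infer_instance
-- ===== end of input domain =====

-- B replaces A's while-loop running total with two staged passes: recursively build the list
-- of extra-fuel terms, then sum it (alternative decomposition, same cost).
-- int(x/3) truncates toward zero: ported as Int.tdiv x 3 (exact for |x| ≤ 2^31,
-- where float division rounds to a value with the same truncation toward zero).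

-- termination measure for both chains: the next fuel term is strictly smaller (cited by name
-- in each port's decreasing_by)
theorem pv_tdiv3_dec {fuel : Int} (h : 0 < Int.tdiv fuel 3 - 2) :
    (Int.tdiv fuel 3 - 2).toNat < fuel.toNat := by
  have hpos : 0 < fuel := by
    by_contra hle
    push Not at hle
    have : Int.tdiv fuel 3 = -(Int.tdiv (-fuel) 3) := by rw [← Int.neg_tdiv]; ring_nf
    have : Int.tdiv (-fuel) 3 = (-fuel) / 3 := Int.tdiv_eq_ediv_of_nonneg (by omega)
    omega
  have : Int.tdiv fuel 3 = fuel / 3 := Int.tdiv_eq_ediv_of_nonneg (le_of_lt hpos)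
  omega

-- ===== PORT A =====
-- the while loop of A: state (fuel, result); loops while int(fuel/3)-2 > 0
def fuelLoopA (fuel result : Int) : Int :=
  if h : Int.tdiv fuel 3 - 2 > 0 then
    fuelLoopA (Int.tdiv fuel 3 - 2) (result + (Int.tdiv fuel 3 - 2))
  else result
termination_by fuel.toNat
decreasing_by exact pv_tdiv3_dec h

def calculate_fuel (mass : Int) (recursive : Bool) : Int :=
  let result := Int.tdiv mass 3 - 2
  if recursive then fuelLoopA result result else result

-- ===== PORT B =====
-- _chain: the list of successive positive extra-fuel terms of the decreasing fuel chain
def chainB (fuel : Int) : List Int :=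
  let nxt := Int.tdiv fuel 3 - 2
  if h : nxt ≤ 0 then []
  else nxt :: chainB nxt
termination_by fuel.toNat
decreasing_by exact pv_tdiv3_dec (by omega)

def calculate_fuel_alt (mass : Int) (recursive : Bool) : Int :=
  let base := Int.tdiv mass 3 - 2
  if recursive then base + (chainB base).sum else base

-- ===== PRECONDITION & SPEC =====
def Spec_calculate_fuel (mass : Int) (recursive : Bool) (out : Int) : Prop := out = calculate_fuel_alt mass recursive
instance (mass : Int) (recursive : Bool) (out : Int) : Decidable (Spec_calculate_fuel mass recursive out) := by unfold Spec_calculate_fuel; infer_instance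

-- ===== CLAIM (what is proved, stated in full; the proofs are below) =====
def Claim_equal_calculate_fuel : Prop := ∀ (mass : Int) (recursive : Bool), Dom_calculate_fuel mass recursive → Spec_calculate_fuel mass recursive (calculate_fuel mass recursive)

-- ===== LEMMAS AND PROOFS =====
theorem fuelLoopA_eq_chain_sum (fuel result : Int) :
    fuelLoopA fuel result = result + (chainB fuel).sum := by
  fun_induction fuelLoopA fuel result with
  | case1 fuel result h ih =>
      rw [chainB]
      simp only [show ¬ (Int.tdiv fuel 3 - 2 ≤ 0) by omega, dif_neg, not_false_iff]
      simp only [List.sum_cons]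
      rw [ih]; ring
  | case2 fuel result h =>
      rw [chainB]
      simp only [show Int.tdiv fuel 3 - 2 ≤ 0 by omega, dif_pos]
      simp

-- ===== VERDICT (by name: the statement is the Claim_ definition above) =====
theorem calculate_fuel_spec : Claim_equal_calculate_fuel := by
  intro mass recursive _
  unfold Spec_calculate_fuel calculate_fuel calculate_fuel_alt
  cases recursive with
  | false => simp
  | true => simp [fuelLoopA_eq_chain_sum]
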